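-- pv_equiv track=rewrite | github.com/chirikondasrikanth/pitwallai | src/circuit_data.py | get_circuit_local_img
-- ===== SOURCE A (Python) =====
-- import unicodedata
--
-- def _normalize_circuit_name(name: str) -> str:
--     normalized = unicodedata.normalize("NFKD", name or "")
--     ascii_name = normalized.encode("ascii", "ignore").decode("ascii")
--     return " ".join(ascii_name.lower().replace("-", " ").split())
--
-- CIRCUIT_LOCAL_IMAGES = {
--     "Australian Grand Prix":    "australian.jpg",
--     "Chinese Grand Prix":       "chinese.jpg",
--     "Japanese Grand Prix":      "japanese.jpg",
--     "Bahrain Grand Prix":       "bahrain.jpg",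
--     "Saudi Arabian Grand Prix": "saudi_2.jpg",
--     "Miami Grand Prix":         "miami.jpg",
--     "Emilia Romagna Grand Prix":"emilia.jpg",
--     "Monaco Grand Prix":        "monaco.jpg",
--     "Spanish Grand Prix":       "spanish.jpg",
--     "Canadian Grand Prix":      "canadian.jpg",
--     "Austrian Grand Prix":      "austrian.jpg",
--     "British Grand Prix":       "british.jpg",
--     "Belgian Grand Prix":       "belgian_2.jpg",
--     "Hungarian Grand Prix":     "hungarian.jpg",
--     "Dutch Grand Prix":         "dutch.jpg",
--     "Italian Grand Prix":       "italian.jpg",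
--     "Azerbaijan Grand Prix":    "azerbaijan.jpg",
--     "Singapore Grand Prix":     "singapore.jpg",
--     "United States Grand Prix": "usa.jpg",
--     "Mexico City Grand Prix":   "mexico.jpg",
--     "São Paulo Grand Prix":     "brazil.jpg",
--     "Las Vegas Grand Prix":     "lasvegas.jpg",
--     "Abu Dhabi Grand Prix":     "abudhabi.jpg",
--     # Qatar has no local image — falls back to image_url
-- }
--
-- def get_circuit_local_img(circuit_name: str) -> str:
--     """Return local asset filename for circuit, or empty string if none."""
--     if circuit_name in CIRCUIT_LOCAL_IMAGES:
--         return CIRCUIT_LOCAL_IMAGES[circuit_name]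
--     # Try normalised match
--     norm = _normalize_circuit_name(circuit_name)
--     for key, fname in CIRCUIT_LOCAL_IMAGES.items():
--         if _normalize_circuit_name(key) == norm:
--             return fname
--     return ""
-- ===== SOURCE B (Python) =====
-- import unicodedata
--
-- # Index built once at module load: normalized key -> filename (keys pre-normalized by hand;
-- # all 23 normalize to distinct strings, and each original key normalizes to the value listed here).
-- NORMALIZED_IMAGES = {
--     "australian grand prix":    "australian.jpg",
--     "chinese grand prix":       "chinese.jpg",
--     "japanese grand prix":      "japanese.jpg",
--     "bahrain grand prix":       "bahrain.jpg",
--     "saudi arabian grand prix": "saudi_2.jpg",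
--     "miami grand prix":         "miami.jpg",
--     "emilia romagna grand prix":"emilia.jpg",
--     "monaco grand prix":        "monaco.jpg",
--     "spanish grand prix":       "spanish.jpg",
--     "canadian grand prix":      "canadian.jpg",
--     "austrian grand prix":      "austrian.jpg",
--     "british grand prix":       "british.jpg",
--     "belgian grand prix":       "belgian_2.jpg",
--     "hungarian grand prix":     "hungarian.jpg",
--     "dutch grand prix":         "dutch.jpg",
--     "italian grand prix":       "italian.jpg",
--     "azerbaijan grand prix":    "azerbaijan.jpg",
--     "singapore grand prix":     "singapore.jpg",
--     "united states grand prix": "usa.jpg",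
--     "mexico city grand prix":   "mexico.jpg",
--     "sao paulo grand prix":     "brazil.jpg",
--     "las vegas grand prix":     "lasvegas.jpg",
--     "abu dhabi grand prix":     "abudhabi.jpg",
-- }
--
--
-- def _normalize_key(name: str) -> str:
--     """Single pass: NFKD-fold, drop non-ASCII, treat '-' and whitespace as word
--     separators, lowercase word characters, single spaces between words."""
--     out = []
--     pending = False
--     for ch in unicodedata.normalize("NFKD", name or ""):
--         if ord(ch) >= 128:
--             continue
--         if ch == "-" or ch.isspace():
--             pending = True
--         else:
--             if pending and out:
--                 out.append(" ")
--             out.append(ch.lower())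
--             pending = False
--     return "".join(out)
--
--
-- def get_circuit_local_img(circuit_name: str) -> str:
--     """Return local asset filename for circuit, or empty string if none."""
--     return NORMALIZED_IMAGES.get(_normalize_key(circuit_name), "")
-- ===== Notes on version B (the rewrite author's own statement) =====
-- stated objective: alternative
-- what changed: Replaces A's exact-match branch plus per-call linear scan that re-normalizes all 23 keys with a pre-normalized literal dict (one lookup per call) and replaces A's staged normalizer (NFKD, ascii-filter, lower, replace, split, join) with a one-pass accumulator normalizer; the exact-match branch is subsumed because every key normalizes to its listed normal form and the 23 normal forms are pairwise distinct.
import Mathlib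
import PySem

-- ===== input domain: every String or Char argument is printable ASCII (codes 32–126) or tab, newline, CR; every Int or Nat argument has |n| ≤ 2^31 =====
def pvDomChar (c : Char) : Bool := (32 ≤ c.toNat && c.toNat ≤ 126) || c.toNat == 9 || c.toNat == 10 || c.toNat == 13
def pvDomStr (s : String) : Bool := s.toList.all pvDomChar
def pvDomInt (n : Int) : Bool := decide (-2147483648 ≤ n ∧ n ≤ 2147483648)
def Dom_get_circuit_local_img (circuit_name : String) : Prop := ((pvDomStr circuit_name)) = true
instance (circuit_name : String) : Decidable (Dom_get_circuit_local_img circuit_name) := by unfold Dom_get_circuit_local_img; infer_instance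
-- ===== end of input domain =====

-- B replaces A's exact-match branch + per-call scan (re-normalizing all keys, each by a
-- staged normalizer) with a pre-normalized literal table and a one-pass accumulator
-- normalizer (objective: alternative — one lookup per call instead of a scan).

-- ===== PORT A =====
-- unicodedata.normalize("NFKD", ·): identity on ASCII (all Dom inputs); the only non-ASCII
-- character occurring in the module's keys is 'ã' (NFKD: 'a' + combining tilde U+0303) — exact there.
def pvNfkdChar (c : Char) : List Char :=
  if c = 'ã' then ['a', Char.ofNat 0x303] else [c]

-- _normalize_circuit_name: NFKD, encode("ascii","ignore") (= drop non-ASCII code points),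
-- lower, '-'→' ', whitespace split, " ".join.  ('name or ""' = name: "" is falsy and normalizes to "".)
def normalize_circuit_name (name : String) : String :=
  let normalized : List Char := name.toList.flatMap pvNfkdChar
  let ascii_name : List Char := normalized.filter (fun c => c.toNat < 128)
  String.ofList (PySem.Chars.join [' ']
    (PySem.Chars.split₀ (PySem.Chars.replace (PySem.Chars.lower ascii_name) ['-'] [' '])))

def CIRCUIT_LOCAL_IMAGES : List (String × String) := [
  ("Australian Grand Prix",    "australian.jpg"),
  ("Chinese Grand Prix",       "chinese.jpg"),
  ("Japanese Grand Prix",      "japanese.jpg"),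
  ("Bahrain Grand Prix",       "bahrain.jpg"),
  ("Saudi Arabian Grand Prix", "saudi_2.jpg"),
  ("Miami Grand Prix",         "miami.jpg"),
  ("Emilia Romagna Grand Prix","emilia.jpg"),
  ("Monaco Grand Prix",        "monaco.jpg"),
  ("Spanish Grand Prix",       "spanish.jpg"),
  ("Canadian Grand Prix",      "canadian.jpg"),
  ("Austrian Grand Prix",      "austrian.jpg"),
  ("British Grand Prix",       "british.jpg"),
  ("Belgian Grand Prix",       "belgian_2.jpg"),
  ("Hungarian Grand Prix",     "hungarian.jpg"),
  ("Dutch Grand Prix",         "dutch.jpg"),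
  ("Italian Grand Prix",       "italian.jpg"),
  ("Azerbaijan Grand Prix",    "azerbaijan.jpg"),
  ("Singapore Grand Prix",     "singapore.jpg"),
  ("United States Grand Prix", "usa.jpg"),
  ("Mexico City Grand Prix",   "mexico.jpg"),
  ("São Paulo Grand Prix",     "brazil.jpg"),
  ("Las Vegas Grand Prix",     "lasvegas.jpg"),
  ("Abu Dhabi Grand Prix",     "abudhabi.jpg")]

-- A: exact-key membership test first, then a scan that normalizes every key.
def get_circuit_local_img (circuit_name : String) : String :=
  match CIRCUIT_LOCAL_IMAGES.find? (fun p => p.1 == circuit_name) with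
  | some p => p.2
  | none =>
      let norm := normalize_circuit_name circuit_name
      match CIRCUIT_LOCAL_IMAGES.find? (fun p => normalize_circuit_name p.1 == norm) with
      | some p => p.2
      | none => ""

-- ===== PORT B =====
-- B's literal dict: normalized key -> filename, written out once at module level.
def NORMALIZED_IMAGES : List (String × String) := [
  ("australian grand prix",    "australian.jpg"),
  ("chinese grand prix",       "chinese.jpg"),
  ("japanese grand prix",      "japanese.jpg"),
  ("bahrain grand prix",       "bahrain.jpg"),
  ("saudi arabian grand prix", "saudi_2.jpg"),
  ("miami grand prix",         "miami.jpg"),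
  ("emilia romagna grand prix","emilia.jpg"),
  ("monaco grand prix",        "monaco.jpg"),
  ("spanish grand prix",       "spanish.jpg"),
  ("canadian grand prix",      "canadian.jpg"),
  ("austrian grand prix",      "austrian.jpg"),
  ("british grand prix",       "british.jpg"),
  ("belgian grand prix",       "belgian_2.jpg"),
  ("hungarian grand prix",     "hungarian.jpg"),
  ("dutch grand prix",         "dutch.jpg"),
  ("italian grand prix",       "italian.jpg"),
  ("azerbaijan grand prix",    "azerbaijan.jpg"),
  ("singapore grand prix",     "singapore.jpg"),
  ("united states grand prix", "usa.jpg"),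
  ("mexico city grand prix",   "mexico.jpg"),
  ("sao paulo grand prix",     "brazil.jpg"),
  ("las vegas grand prix",     "lasvegas.jpg"),
  ("abu dhabi grand prix",     "abudhabi.jpg")]

-- one iteration of _normalize_key's loop body (state = (out, pending))
def normKeyStep (st : List Char × Bool) (ch : Char) : List Char × Bool :=
  if 128 ≤ ch.toNat then st
  else if ch == '-' || PySem.Chars.isspace ch then (st.1, true)
  else (st.1 ++ (if st.2 && !st.1.isEmpty then [' '] else []) ++ [PySem.Chars.lowerChar ch], false)

-- _normalize_key: single pass over the NFKD form accumulating (out, pending)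
def normalize_key (name : String) : String :=
  String.ofList ((name.toList.flatMap pvNfkdChar).foldl normKeyStep ([], false)).1

-- B: normalize once, one dict lookup.
def get_circuit_local_img_alt (circuit_name : String) : String :=
  match NORMALIZED_IMAGES.find? (fun p => p.1 == normalize_key circuit_name) with
  | some p => p.2
  | none => ""

-- ===== PRECONDITION & SPEC =====
def Spec_get_circuit_local_img (circuit_name : String) (out : String) : Prop := out = get_circuit_local_img_alt circuit_name
instance (circuit_name : String) (out : String) : Decidable (Spec_get_circuit_local_img circuit_name out) := by unfold Spec_get_circuit_local_img; infer_instance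

-- ===== CLAIM (what is proved, stated in full; the proofs are below) =====
def Claim_equal_get_circuit_local_img : Prop := ∀ (circuit_name : String), Dom_get_circuit_local_img circuit_name → Spec_get_circuit_local_img circuit_name (get_circuit_local_img circuit_name)

-- ===== LEMMAS AND PROOFS =====

-- the character map A's staged pipeline applies pointwise: lower, then '-' → ' '
def gChar (c : Char) : Char :=
  if PySem.Chars.lowerChar c = '-' then ' ' else PySem.Chars.lowerChar c

-- B's loop body specialized to pre-mapped ASCII characters
def coreStep (st : List Char × Bool) (c : Char) : List Char × Bool :=
  if PySem.Chars.isspace c then (st.1, true)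
  else (st.1 ++ (if st.2 && !st.1.isEmpty then [' '] else []) ++ [c], false)

-- per-character facts that hold for every Dom character (checked by enumeration of codes < 127)
set_option maxRecDepth 16384 in
theorem dom_char_facts (c : Char) (h : pvDomChar c = true) :
    (¬ 128 ≤ c.toNat) ∧ decide (c.toNat < 128) = true ∧ pvNfkdChar c = [c] ∧
    PySem.Chars.isspace (gChar c) = (c == '-' || PySem.Chars.isspace c) ∧
    ((c == '-' || PySem.Chars.isspace c) = false → gChar c = PySem.Chars.lowerChar c) := by
  have hn : c.toNat < 127 := by
    simp [pvDomChar] at h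
    omega
  have hall : ∀ n ∈ List.range 127,
      (¬ 128 ≤ (Char.ofNat n).toNat) ∧ decide ((Char.ofNat n).toNat < 128) = true ∧
      pvNfkdChar (Char.ofNat n) = [Char.ofNat n] ∧
      PySem.Chars.isspace (gChar (Char.ofNat n))
        = ((Char.ofNat n) == '-' || PySem.Chars.isspace (Char.ofNat n)) ∧
      (((Char.ofNat n) == '-' || PySem.Chars.isspace (Char.ofNat n)) = false →
        gChar (Char.ofNat n) = PySem.Chars.lowerChar (Char.ofNat n)) := by decide
  have := hall c.toNat (List.mem_range.mpr hn)
  rwa [Char.ofNat_toNat] at this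

-- replace with a single-character pattern is a pointwise map
theorem replace_go_dash (l : List Char) : ∀ (fuel : Nat) (acc : List Char), l.length ≤ fuel →
    PySem.Chars.replace.go ['-'] [' '] fuel l acc
      = acc.reverse ++ l.map (fun c => if c = '-' then ' ' else c) := by
  induction l with
  | nil => intro fuel acc _; cases fuel <;> simp [PySem.Chars.replace.go]
  | cons c t ih =>
    intro fuel acc hf
    cases fuel with
    | zero => simp at hf
    | succ f =>
      by_cases hc : c = '-'
      · subst hc
        rw [show PySem.Chars.replace.go ['-'] [' '] (f+1) ('-' :: t) acc
              = PySem.Chars.replace.go ['-'] [' '] f t (' ' :: acc) by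
            simp [PySem.Chars.replace.go, List.isPrefixOf]]
        rw [ih f (' ' :: acc) (by simpa using hf)]
        simp
      · rw [show PySem.Chars.replace.go ['-'] [' '] (f+1) (c :: t) acc
              = PySem.Chars.replace.go ['-'] [' '] f t (c :: acc) by
            simp only [PySem.Chars.replace.go, List.isPrefixOf]
            rw [if_neg (by simp [Ne.symm hc])]]
        rw [ih f (c :: acc) (by simpa using hf)]
        simp [hc]

theorem replace_dash (l : List Char) :
    PySem.Chars.replace l ['-'] [' '] = l.map (fun c => if c = '-' then ' ' else c) := by
  simpa [PySem.Chars.replace] using replace_go_dash l l.length [] le_rfl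

-- intercalate facts used for the word accumulator
theorem inter_cons (s a : List Char) (t : List (List Char)) :
    List.intercalate s (a :: t) = if t = [] then a else a ++ s ++ List.intercalate s t := by
  cases t <;> simp [List.intercalate, List.intersperse]

theorem inter_append_last (ws : List (List Char)) (w : List Char) (hws : ws ≠ []) :
    List.intercalate [' '] (ws ++ [w]) = List.intercalate [' '] ws ++ ' ' :: w := by
  induction ws with
  | nil => simp at hws
  | cons a t ih =>
    cases t with
    | nil => simp [List.intercalate, List.intersperse]
    | cons b u =>
      rw [List.cons_append, inter_cons, inter_cons (t := b :: u)]
      simpa using ih (by simp)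

theorem inter_extend_last (ws : List (List Char)) (w x : List Char) :
    List.intercalate [' '] (ws ++ [w ++ x]) = List.intercalate [' '] (ws ++ [w]) ++ x := by
  induction ws with
  | nil => simp [List.intercalate]
  | cons a t ih =>
    rw [List.cons_append, inter_cons, List.cons_append, inter_cons]
    simp [ih]

theorem inter_ne_nil (ws : List (List Char)) (h1 : ws ≠ []) (h2 : ∀ w ∈ ws, w ≠ []) :
    List.intercalate [' '] ws ≠ [] := by
  cases ws with
  | nil => simp at h1
  | cons a t =>
    rw [inter_cons]
    have ha : a ≠ [] := h2 a (by simp)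
    cases t <;> simp [ha]

-- the string assembled so far, as a function of split₀.go's state
def renderW (acc : List (List Char)) (cur : List Char) : List Char :=
  PySem.Chars.join [' '] (PySem.Chars.split₀.go [] cur acc)

theorem renderW_eq (acc : List (List Char)) (cur : List Char) :
    renderW acc cur = List.intercalate [' ']
      (if cur.isEmpty then acc.reverse else acc.reverse ++ [cur.reverse]) := by
  cases cur <;> simp [renderW, PySem.Chars.join, PySem.Chars.split₀.go]

-- one non-separator character extends the rendered state by that character
theorem renderW_snoc (acc : List (List Char)) (cur : List Char) (c : Char)
    (hacc : ∀ w ∈ acc, w ≠ []) :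
    renderW acc cur ++ (if cur.isEmpty && !(renderW acc cur).isEmpty then [' '] else []) ++ [c]
      = renderW acc (c :: cur) := by
  cases cur with
  | cons c0 cs =>
    rw [renderW_eq, renderW_eq]
    simp only [List.isEmpty_cons, Bool.false_and, if_neg Bool.false_ne_true]
    rw [show (c :: c0 :: cs).reverse = (c0 :: cs).reverse ++ [c] by simp]
    rw [inter_extend_last]
    simp
  | nil =>
    rw [renderW_eq, renderW_eq]
    cases acc with
    | nil => simp [List.intercalate]
    | cons a as =>
      have hne : [' '].intercalate (as.reverse ++ [a]) ≠ [] := by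
        simpa using inter_ne_nil ((a :: as).reverse) (by simp) (by
          intro w hw
          exact hacc w (List.mem_reverse.mp hw))
      simp only [List.isEmpty_nil, List.isEmpty_cons, if_true, List.reverse_cons, Bool.true_and,
        List.reverse_nil, List.nil_append]
      rw [if_pos (by simp [hne]), if_neg (by simp)]
      rw [show as.reverse ++ [a] ++ [[c]] = (as.reverse ++ [a]) ++ [[c]] by simp]
      rw [inter_append_last (as.reverse ++ [a]) [c] (by simp)]
      simp

-- the single-pass loop computes exactly split-then-join, for any split₀.go state
theorem core_go (l : List Char) : ∀ (acc : List (List Char)) (cur : List Char),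
    (∀ w ∈ acc, w ≠ []) →
    (l.foldl coreStep (renderW acc cur, cur.isEmpty)).1
      = PySem.Chars.join [' '] (PySem.Chars.split₀.go l cur acc) := by
  induction l with
  | nil => intro acc cur _; rfl
  | cons c rest ih =>
    intro acc cur hacc
    simp only [List.foldl_cons]
    by_cases hs : PySem.Chars.isspace c = true
    · rw [show coreStep (renderW acc cur, cur.isEmpty) c = (renderW acc cur, true) by
        simp [coreStep, hs]]
      cases cur with
      | nil =>
        rw [show PySem.Chars.split₀.go (c :: rest) [] acc = PySem.Chars.split₀.go rest [] acc by
          simp [PySem.Chars.split₀.go, hs]]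
        exact ih acc [] hacc
      | cons c0 cs =>
        rw [show PySem.Chars.split₀.go (c :: rest) (c0 :: cs) acc
              = PySem.Chars.split₀.go rest [] ((c0 :: cs).reverse :: acc) by
          simp [PySem.Chars.split₀.go, hs]]
        rw [show renderW acc (c0 :: cs) = renderW ((c0 :: cs).reverse :: acc) [] by
          rw [renderW_eq, renderW_eq]; simp]
        exact ih ((c0 :: cs).reverse :: acc) [] (by
          intro w hw
          rcases List.mem_cons.mp hw with rfl | hw
          · simp
          · exact hacc w hw)
    · rw [show coreStep (renderW acc cur, cur.isEmpty) c
            = (renderW acc cur ++ (if cur.isEmpty && !(renderW acc cur).isEmpty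
                then [' '] else []) ++ [c], false) by simp [coreStep, hs]]
      rw [show PySem.Chars.split₀.go (c :: rest) cur acc
            = PySem.Chars.split₀.go rest (c :: cur) acc by
          simp [PySem.Chars.split₀.go, hs]]
      rw [renderW_snoc acc cur c hacc]
      exact ih acc (c :: cur) hacc

-- with an empty accumulator the pending flag is irrelevant
theorem core_nil_flag (l : List Char) : ∀ (b b' : Bool),
    (l.foldl coreStep ([], b)).1 = (l.foldl coreStep ([], b')).1 := by
  induction l with
  | nil => intro b b'; rfl
  | cons c t ih =>
    intro b b'
    simp only [List.foldl_cons]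
    by_cases hs : PySem.Chars.isspace c = true
    · simp [coreStep, hs]
    · simp [coreStep, hs]

-- B's loop over Dom characters is the core loop over the pointwise-mapped characters
theorem fold_bridge (l : List Char) : ∀ (st : List Char × Bool), (∀ c ∈ l, pvDomChar c = true) →
    l.foldl normKeyStep st = (l.map gChar).foldl coreStep st := by
  induction l with
  | nil => intro st _; rfl
  | cons c t ih =>
    intro st h
    obtain ⟨h128, _, _, hsp, hng⟩ := dom_char_facts c (h c (by simp))
    have hstep : normKeyStep st c = coreStep st (gChar c) := by
      rw [normKeyStep, if_neg h128]
      by_cases hsep : (c == '-' || PySem.Chars.isspace c) = true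
      · rw [if_pos hsep, coreStep, if_pos (hsp.trans hsep)]
      · have hsp' : PySem.Chars.isspace (gChar c) = false := by
          rw [hsp]
          exact Bool.not_eq_true _ ▸ hsep
        have hglow : gChar c = PySem.Chars.lowerChar c := hng (Bool.not_eq_true _ ▸ hsep)
        have hnot : ¬ (PySem.Chars.isspace (gChar c) = true) := by simp [hsp']
        rw [if_neg hsep, coreStep, if_neg hnot, hglow]
    simp only [List.foldl_cons, List.map_cons, hstep]
    exact ih _ (fun c hc => h c (by simp [hc]))

theorem nfkd_id (l : List Char) (h : ∀ c ∈ l, pvDomChar c = true) :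
    l.flatMap pvNfkdChar = l := by
  induction l with
  | nil => rfl
  | cons c t ih =>
    obtain ⟨_, _, hk, _, _⟩ := dom_char_facts c (h c (by simp))
    simp only [List.flatMap_cons, hk]
    rw [ih (fun c hc => h c (by simp [hc]))]
    rfl

-- on Dom inputs B's one-pass normalizer equals A's staged normalizer
theorem norm_eq (s : String) (h : Dom_get_circuit_local_img s) :
    normalize_key s = normalize_circuit_name s := by
  have hall : ∀ c ∈ s.toList, pvDomChar c = true := by
    simpa [Dom_get_circuit_local_img, pvDomStr, List.all_eq_true] using h
  unfold normalize_key normalize_circuit_name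
  rw [nfkd_id _ hall]
  have hfil : s.toList.filter (fun c => c.toNat < 128) = s.toList :=
    List.filter_eq_self.mpr (fun c hc => (dom_char_facts c (hall c hc)).2.1)
  simp only [hfil]
  congr 1
  rw [fold_bridge _ _ hall, core_nil_flag _ false true]
  have hcg := core_go (s.toList.map gChar) [] [] (by simp)
  rw [show renderW [] [] = [] from rfl, show (([] : List Char).isEmpty) = true from rfl] at hcg
  rw [hcg]
  congr 1
  show PySem.Chars.split₀ _ = _
  unfold PySem.Chars.split₀
  congr 1
  rw [replace_dash, PySem.Chars.lower, List.map_map]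
  rfl

-- B's literal table is A's table with every key normalized (kernel computation)
theorem normalized_images_eq :
    NORMALIZED_IMAGES = CIRCUIT_LOCAL_IMAGES.map (fun p => (normalize_circuit_name p.1, p.2)) := by
  decide

-- The 23 normalized keys are pairwise distinct (kernel computation).
theorem nodup_normalized_keys :
    (CIRCUIT_LOCAL_IMAGES.map (fun p => normalize_circuit_name p.1)).Nodup := by decide

-- If the normalized keys of l are pairwise distinct, the first exact key match is also the
-- first normalized match (A's exact-match branch agrees with the normalized lookup).
theorem find?_norm_of_find?_exact (nrm : String → String) (k : String) :
    ∀ (l : List (String × String)), (l.map (fun p => nrm p.1)).Nodup →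
    ∀ p, l.find? (fun q => q.1 == k) = some p →
    l.find? (fun q => nrm q.1 == nrm k) = some p := by
  intro l
  induction l with
  | nil => intro _ p h; simp [List.find?] at h
  | cons q t ih =>
    intro hnd p h
    simp only [List.map_cons, List.nodup_cons] at hnd
    by_cases hq : q.1 = k
    · rw [List.find?_cons_of_pos (by simp [hq])] at h
      rw [List.find?_cons_of_pos (by simp [hq])]
      exact h
    · rw [List.find?_cons_of_neg (by simp [hq])] at h
      have hmem : p ∈ t := List.mem_of_find?_eq_some h
      have hpk : p.1 = k := by
        have := List.find?_some h; simpa using this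
      have hne : nrm q.1 ≠ nrm k := by
        intro hEq
        exact hnd.1 (by
          rw [hEq, ← hpk]
          exact List.mem_map_of_mem hmem)
      rw [List.find?_cons_of_neg (by simp [hne])]
      exact ih hnd.2 p h

-- ===== VERDICT (by name: the statement is the Claim_ definition above) =====
theorem get_circuit_local_img_spec : Claim_equal_get_circuit_local_img := by
  intro circuit_name hdom
  unfold Spec_get_circuit_local_img get_circuit_local_img get_circuit_local_img_alt
  rw [norm_eq circuit_name hdom, normalized_images_eq, List.find?_map]
  cases hex : CIRCUIT_LOCAL_IMAGES.find? (fun p => p.1 == circuit_name) with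
  | some p =>
      have := find?_norm_of_find?_exact normalize_circuit_name circuit_name
        CIRCUIT_LOCAL_IMAGES nodup_normalized_keys p hex
      simp [Function.comp_def, this]
  | none =>
      cases hn : CIRCUIT_LOCAL_IMAGES.find?
          (fun q => normalize_circuit_name q.1 == normalize_circuit_name circuit_name) with
      | some p => simp [Function.comp_def, hn]
      | none => simp [Function.comp_def, hn]
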